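-- pv_equiv track=rewrite | github.com/Dichao-Liu/ddr-lfga | eval_dmd.py | _segments_from_per_frame
-- ===== SOURCE A (Python) =====
-- from typing import Dict, List, Set, Tuple, Optional
--
-- def _segments_from_per_frame(pf: List[Set[str]]) -> List[Tuple[int, int, Set[str]]]:
--     segs: List[Tuple[int, int, Set[str]]] = []
--     if not pf:
--         return segs
--     cur = set(pf[0]); start = 0
--     for i in range(1, len(pf)):
--         if pf[i] != cur:
--             segs.append((start, i - 1, set(cur)))
--             start = i; cur = set(pf[i])
--     segs.append((start, len(pf) - 1, set(cur)))
--     return segs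
-- ===== SOURCE B (Python) =====
-- def _segments_from_per_frame(pf):
--     n = len(pf)
--
--     def run_end(head, j):
--         while j < n and pf[j] == head:
--             j += 1
--         return j
--
--     def go(i):
--         if i >= n:
--             return []
--         j = run_end(pf[i], i + 1)
--         return [(i, j - 1, set(pf[i]))] + go(j)
--
--     return go(0)
-- ===== Notes on version B (the rewrite author's own statement) =====
-- stated objective: alternative
-- what changed: Replaces A's single-pass loop with running cur/start/segs accumulators and predecessor comparisons by a recursive run-peeling decomposition: go(i) finds the end of the maximal run whose members equal the run head pf[i] (an inner scan run_end), emits one (start, end, set) triple, and recurses at the next run start.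
import Mathlib
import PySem

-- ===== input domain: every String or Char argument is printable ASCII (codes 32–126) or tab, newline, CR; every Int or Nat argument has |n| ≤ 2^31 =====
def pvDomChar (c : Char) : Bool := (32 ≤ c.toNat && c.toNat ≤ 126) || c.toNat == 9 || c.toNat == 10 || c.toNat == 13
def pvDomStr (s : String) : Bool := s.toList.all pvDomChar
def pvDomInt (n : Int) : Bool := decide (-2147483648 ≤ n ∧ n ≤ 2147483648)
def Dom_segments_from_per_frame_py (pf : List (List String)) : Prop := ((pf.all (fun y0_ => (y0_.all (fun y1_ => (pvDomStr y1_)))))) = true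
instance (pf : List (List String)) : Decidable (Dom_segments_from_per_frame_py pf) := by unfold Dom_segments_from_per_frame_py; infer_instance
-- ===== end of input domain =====

-- B replaces A's single fused loop with running cur/start/segs accumulators by a recursive
-- run-peeling decomposition (find the end of the maximal run equal to the run head, emit one
-- segment, recurse at the next run start); same cost, alternative decomposition.

-- ===== PORT A =====
-- loop body of A's for-loop: state is (segs, start, cur); cur is always a set built by
-- set(...) (PySem.Set.ofList), so Python's copy set(cur) appended into segs is cur itself
def pvStepA (pf : List (List String)) (acc : List (Int × Int × List String) × Int × List String) (i : Int) :
    List (Int × Int × List String) × Int × List String :=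
  if PySem.Set.equal (PySem.List.pyGetD pf i []) acc.2.2 then acc
  else (acc.1 ++ [(acc.2.1, i - 1, acc.2.2)], i, PySem.Set.ofList (PySem.List.pyGetD pf i []))

def segments_from_per_frame_py (pf : List (List String)) : List (Int × Int × List String) :=
  if pf = [] then []
  else
    let st := (PySem.List.pyRange 1 (pf.length : Int) 1).foldl (pvStepA pf)
      ([], 0, PySem.Set.ofList (PySem.List.pyGetD pf 0 []))
    st.1 ++ [(st.2.1, (pf.length : Int) - 1, st.2.2)]

-- ===== PORT B =====
-- Source B's run_end: while j < n and pf[j] == head: j += 1 (Python set equality)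
def pvRunEnd (pf : List (List String)) (head : List String) (j : Nat) : Nat :=
  if h : j < pf.length ∧ PySem.Set.equal (PySem.List.pyGetD pf (j : Int) []) head = true
  then pvRunEnd pf head (j + 1)
  else j
termination_by pf.length - j
decreasing_by omega

-- termination fact the port needs: run_end never moves left
lemma pvRunEnd_ge (pf : List (List String)) (head : List String) (j : Nat) :
    j ≤ pvRunEnd pf head j := by
  rw [pvRunEnd]
  split
  · exact Nat.le_trans (Nat.le_succ j) (pvRunEnd_ge pf head (j + 1))
  · exact Nat.le_refl j
termination_by pf.length - j
decreasing_by rename_i h; omega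

-- Source B's go: peel the maximal run starting at i, recurse at its end
def pvGo (pf : List (List String)) (i : Nat) : List (Int × Int × List String) :=
  if h : i < pf.length then
    ((i : Int), ((pvRunEnd pf (PySem.List.pyGetD pf (i : Int) []) (i + 1) : Nat) : Int) - 1,
      PySem.Set.ofList (PySem.List.pyGetD pf (i : Int) []))
      :: pvGo pf (pvRunEnd pf (PySem.List.pyGetD pf (i : Int) []) (i + 1))
  else []
termination_by pf.length - i
decreasing_by
  have := pvRunEnd_ge pf (PySem.List.pyGetD pf (i : Int) []) (i + 1); omega

def segments_from_per_frame_py_alt (pf : List (List String)) : List (Int × Int × List String) :=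
  pvGo pf 0

-- ===== PRECONDITION & SPEC =====
def Spec_segments_from_per_frame_py (pf : List (List String)) (out : List (Int × Int × List String)) : Prop := out = segments_from_per_frame_py_alt pf
instance (pf : List (List String)) (out : List (Int × Int × List String)) : Decidable (Spec_segments_from_per_frame_py pf out) := by unfold Spec_segments_from_per_frame_py; infer_instance

-- ===== CLAIM (what is proved, stated in full; the proofs are below) =====
def Claim_equal_segments_from_per_frame_py : Prop := ∀ (pf : List (List String)), Dom_segments_from_per_frame_py pf → Spec_segments_from_per_frame_py pf (segments_from_per_frame_py pf)

-- ===== LEMMAS AND PROOFS =====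

-- Set.equal is a congruence in its second argument
lemma pv_equal_congr {x c d : List String} (h : PySem.Set.equal c d = true) :
    PySem.Set.equal x c = PySem.Set.equal x d := by
  have hcd := (PySem.Set.equal_iff _ _).mp h
  by_cases hx : PySem.Set.equal x d = true
  · rw [hx]
    exact (PySem.Set.equal_iff _ _).mpr (fun z => ((PySem.Set.equal_iff _ _).mp hx z).trans (hcd z).symm)
  · have hx' : PySem.Set.equal x c ≠ true := fun hc =>
      hx ((PySem.Set.equal_iff _ _).mpr (fun z => ((PySem.Set.equal_iff _ _).mp hc z).trans (hcd z)))
    simp only [Bool.not_eq_true] at hx hx'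
    rw [hx, hx']

lemma pv_equal_ofList_self (s : List String) :
    PySem.Set.equal (PySem.Set.ofList s) s = true :=
  (PySem.Set.equal_iff _ _).mpr (fun z => PySem.Set.mem_ofList s z)

lemma pv_equal_refl (s : List String) : PySem.Set.equal s s = true :=
  (PySem.Set.equal_iff _ _).mpr (fun _ => Iff.rfl)

-- run_end stops exactly at the first non-matching index (or at the end of the list)
lemma pvRunEnd_stop (pf : List (List String)) (head : List String) (j a : Nat)
    (hja : j ≤ a) (han : a ≤ pf.length)
    (hall : ∀ t : Nat, j ≤ t → t < a → PySem.Set.equal (PySem.List.pyGetD pf (t : Int) []) head = true)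
    (hstop : a = pf.length ∨ PySem.Set.equal (PySem.List.pyGetD pf (a : Int) []) head = false) :
    pvRunEnd pf head j = a := by
  rw [pvRunEnd]
  by_cases hj : j = a
  · subst hj
    rw [dif_neg]
    rcases hstop with h | h
    · omega
    · intro hc; rw [hc.2] at h; exact absurd h (by simp)
  · have hjlt : j < a := lt_of_le_of_ne hja hj
    rw [dif_pos ⟨lt_of_lt_of_le hjlt han, hall j (le_refl j) hjlt⟩]
    exact pvRunEnd_stop pf head (j + 1) a hjlt han (fun t ht hta => hall t (by omega) hta) hstop
termination_by a - j

-- Main invariant: folding A's loop body over indices [a, n) from segment start s0 — where all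
-- indices in [s0, a) carry sets equal to pf[s0] — and then closing with the final segment
-- equals segs followed by B's run-peeling from s0.
lemma pvMain (pf : List (List String)) :
    ∀ (k a s0 : Nat) (segs : List (Int × Int × List String)),
      s0 < a → a + k = pf.length →
      (∀ t : Nat, s0 ≤ t → t < a →
        PySem.Set.equal (PySem.List.pyGetD pf (t : Int) []) (PySem.List.pyGetD pf (s0 : Int) []) = true) →
      (let st := (PySem.List.pyRange (a : Int) (pf.length : Int) 1).foldl (pvStepA pf)
          (segs, (s0 : Int), PySem.Set.ofList (PySem.List.pyGetD pf (s0 : Int) []))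
       st.1 ++ [(st.2.1, (pf.length : Int) - 1, st.2.2)]) = segs ++ pvGo pf s0 := by
  intro k
  induction k with
  | zero =>
    intro a s0 segs hsa hak hinv
    have han : a = pf.length := by omega
    have hrange : PySem.List.pyRange (a : Int) (pf.length : Int) 1 = [] :=
      PySem.List.pyRange_one_eq_nil (by omega)
    have hgo : pvGo pf s0 = [((s0 : Int), (pf.length : Int) - 1,
        PySem.Set.ofList (PySem.List.pyGetD pf (s0 : Int) []))] := by
      rw [pvGo, dif_pos (by omega : s0 < pf.length)]
      have hre : pvRunEnd pf (PySem.List.pyGetD pf (s0 : Int) []) (s0 + 1) = pf.length :=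
        pvRunEnd_stop pf _ (s0 + 1) pf.length (by omega) (le_refl _)
          (fun t ht htl => hinv t (by omega) (by omega)) (Or.inl rfl)
      rw [hre, pvGo, dif_neg (by omega)]
    simp [hrange, hgo]
  | succ k ih =>
    intro a s0 segs hsa hak hinv
    have haltn : a < pf.length := by omega
    have hcons : PySem.List.pyRange (a : Int) (pf.length : Int) 1
        = (a : Int) :: PySem.List.pyRange ((a : Int) + 1) (pf.length : Int) 1 := by
      rw [PySem.List.pyRange_one_cons (by exact_mod_cast haltn)]
    have hcmp : PySem.Set.equal (PySem.List.pyGetD pf (a : Int) [])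
        (PySem.Set.ofList (PySem.List.pyGetD pf (s0 : Int) []))
        = PySem.Set.equal (PySem.List.pyGetD pf (a : Int) []) (PySem.List.pyGetD pf (s0 : Int) []) :=
      pv_equal_congr (pv_equal_ofList_self _)
    have hcast : ((a : Int) + 1) = ((a + 1 : Nat) : Int) := by push_cast; ring
    by_cases hb : PySem.Set.equal (PySem.List.pyGetD pf (a : Int) []) (PySem.List.pyGetD pf (s0 : Int) []) = true
    · -- same set: A's state unchanged, B's run extends past a
      have hstep : pvStepA pf (segs, (s0 : Int), PySem.Set.ofList (PySem.List.pyGetD pf (s0 : Int) []))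
          (a : Int) = (segs, (s0 : Int), PySem.Set.ofList (PySem.List.pyGetD pf (s0 : Int) [])) := by
        simp only [pvStepA, hcmp, hb]; rfl
      rw [hcons]
      simp only [List.foldl_cons, hstep, hcast]
      exact ih (a + 1) s0 segs (by omega) (by omega)
        (fun t ht hta => by
          by_cases hta' : t < a
          · exact hinv t ht hta'
          · have : t = a := by omega
            subst this; exact hb)
    · -- different set: A closes the segment, B emits the run ending at a - 1
      have hbf : PySem.Set.equal (PySem.List.pyGetD pf (a : Int) []) (PySem.List.pyGetD pf (s0 : Int) []) = false :=
        Bool.eq_false_iff.mpr hb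
      have hstep : pvStepA pf (segs, (s0 : Int), PySem.Set.ofList (PySem.List.pyGetD pf (s0 : Int) []))
          (a : Int) = (segs ++ [((s0 : Int), (a : Int) - 1, PySem.Set.ofList (PySem.List.pyGetD pf (s0 : Int) []))],
            (a : Int), PySem.Set.ofList (PySem.List.pyGetD pf (a : Int) [])) := by
        simp only [pvStepA, hcmp, hbf, Bool.false_eq_true, if_false]
      have hgo : pvGo pf s0 = ((s0 : Int), (a : Int) - 1,
          PySem.Set.ofList (PySem.List.pyGetD pf (s0 : Int) [])) :: pvGo pf a := by
        rw [pvGo, dif_pos (by omega : s0 < pf.length)]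
        have hre : pvRunEnd pf (PySem.List.pyGetD pf (s0 : Int) []) (s0 + 1) = a :=
          pvRunEnd_stop pf _ (s0 + 1) a (by omega) (by omega)
            (fun t ht hta => hinv t (by omega) hta) (Or.inr hbf)
        rw [hre]
      rw [hcons]
      simp only [List.foldl_cons, hstep, hcast]
      have := ih (a + 1) a (segs ++ [((s0 : Int), (a : Int) - 1, PySem.Set.ofList (PySem.List.pyGetD pf (s0 : Int) []))])
        (by omega) (by omega)
        (fun t ht hta => by
          have : t = a := by omega
          subst this; exact pv_equal_refl _)
      rw [this, hgo]
      simp [List.append_assoc]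

-- ===== VERDICT (by name: the statement is the Claim_ definition above) =====
theorem segments_from_per_frame_py_spec : Claim_equal_segments_from_per_frame_py := by
  intro pf _
  unfold Spec_segments_from_per_frame_py segments_from_per_frame_py segments_from_per_frame_py_alt
  by_cases hpf : pf = []
  · subst hpf
    rw [pvGo, dif_neg (by simp)]
    simp
  · have hlen : 1 ≤ pf.length := by
      have : pf.length ≠ 0 := fun h => hpf (List.eq_nil_of_length_eq_zero h)
      omega
    rw [if_neg hpf]
    have := pvMain pf (pf.length - 1) 1 0 [] (by omega) (by omega)
      (fun t ht hta => by
        have : t = 0 := by omega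
        subst this; exact pv_equal_refl _)
    simpa using this
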